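-- pv_equiv track=rewrite | github.com/fredriksvendsen/aoc | 2024/2/main.py | is_safe
-- ===== SOURCE A (Python) =====
-- def is_safe(report):
--     prev = None
--     increasing = None
--     for idx, num in enumerate(report):
--         if idx == 0:
--             prev = num
--             continue
--         if idx == 1:
--             increasing = True if num > prev else False
--         if increasing and not (num > prev and num <= prev + 3):
--             return False
--         if not increasing and not (num < prev and num >= prev - 3):
--             return False
--         prev = num
--     return True
-- ===== SOURCE B (Python) =====
-- from itertools import pairwise
--
-- def is_safe(report):
--     diffs = [b - a for a, b in pairwise(report)]
--     return all(1 <= d <= 3 for d in diffs) or all(-3 <= d <= -1 for d in diffs)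
-- ===== Notes on version B (the rewrite author's own statement) =====
-- stated objective: simpler
-- what changed: B builds the list of consecutive differences once and tests the two monotonic hypotheses with all(...) or all(...), instead of threading prev/increasing state and detecting the direction from the first pair inside an indexed loop.
import Mathlib
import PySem

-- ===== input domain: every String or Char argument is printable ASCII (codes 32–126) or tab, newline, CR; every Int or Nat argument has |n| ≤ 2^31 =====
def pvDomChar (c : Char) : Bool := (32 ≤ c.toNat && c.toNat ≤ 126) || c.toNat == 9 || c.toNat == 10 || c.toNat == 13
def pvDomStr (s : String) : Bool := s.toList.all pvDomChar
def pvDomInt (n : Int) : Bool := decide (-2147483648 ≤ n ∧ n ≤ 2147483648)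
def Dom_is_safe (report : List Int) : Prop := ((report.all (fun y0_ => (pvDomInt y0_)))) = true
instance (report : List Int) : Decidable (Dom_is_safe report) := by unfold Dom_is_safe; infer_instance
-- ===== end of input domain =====

-- B tests the two monotonic hypotheses on the list of consecutive differences (all ascending by 1..3, or all descending),
-- instead of A's indexed loop that detects the direction from the first pair and threads prev/increasing state. Same values everywhere.

-- ===== PORT A =====
-- state: prev (None before idx 0), increasing (None before idx 1); early `return False` = the `false` branches
def isSafeLoopA : List (Int × Int) → Option Int → Option Bool → Bool
  | [], _, _ => true
  | (idx, num) :: rest, prev, incr =>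
    if idx = 0 then isSafeLoopA rest (some num) incr
    else
      let p := prev.getD 0   -- prev is always `some` when idx ≠ 0
      let incr' := if idx = 1 then some (decide (num > p)) else incr
      if incr'.getD false && !(decide (num > p) && decide (num ≤ p + 3)) then false
      else if !(incr'.getD false) && !(decide (num < p) && decide (num ≥ p - 3)) then false
      else isSafeLoopA rest (some num) incr'

def is_safe (report : List Int) : Bool :=
  isSafeLoopA (PySem.List.enumerate report) none none

-- ===== PORT B =====
def is_safe_alt (report : List Int) : Bool :=
  let diffs := (report.zip report.tail).map (fun q => q.2 - q.1)
  (diffs.all (fun d => decide (1 ≤ d) && decide (d ≤ 3))) ||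
  (diffs.all (fun d => decide (-3 ≤ d) && decide (d ≤ -1)))

-- ===== PRECONDITION & SPEC =====
def Spec_is_safe (report : List Int) (out : Bool) : Prop := out = is_safe_alt report
instance (report : List Int) (out : Bool) : Decidable (Spec_is_safe report out) := by unfold Spec_is_safe; infer_instance

-- ===== CLAIM (what is proved, stated in full; the proofs are below) =====
def Claim_equal_is_safe : Prop := ∀ (report : List Int), Dom_is_safe report → Spec_is_safe report (is_safe report)

-- ===== LEMMAS AND PROOFS =====

-- the per-step checks, in B's difference form
def upStep (a b : Int) : Bool := decide (1 ≤ b - a) && decide (b - a ≤ 3)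
def dnStep (a b : Int) : Bool := decide (-3 ≤ b - a) && decide (b - a ≤ -1)

def chainAll (b : Bool) (p : Int) (l : List Int) : Bool :=
  ((p :: l).zip l).all (fun q => if b then upStep q.1 q.2 else dnStep q.1 q.2)

lemma chainAll_nil (b : Bool) (p : Int) : chainAll b p [] = true := rfl

lemma chainAll_cons (b : Bool) (p y : Int) (l : List Int) :
    chainAll b p (y :: l) = ((if b then upStep p y else dnStep p y) && chainAll b y l) := by
  simp [chainAll]


lemma loopA_tail (rest : List Int) (p : Int) (b : Bool) (k : Int) (hk : 2 ≤ k) :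
    isSafeLoopA (PySem.List.enumerate rest k) (some p) (some b) = chainAll b p rest := by
  induction rest generalizing p k with
  | nil => simp [PySem.List.enumerate_nil, isSafeLoopA, chainAll_nil]
  | cons y l ih =>
    rw [PySem.List.enumerate_cons]
    have hk0 : ¬ (k = 0) := by omega
    have hk1 : ¬ (k = 1) := by omega
    cases b with
    | true =>
      by_cases hc : y > p ∧ y ≤ p + 3
      · have hu : upStep p y = true := by simp [upStep]; omega
        simp [isSafeLoopA, hk0, hk1, chainAll_cons, hu, ih y (k + 1) (by omega)]
        intros; omega
      · have hu : upStep p y = false := by simp [upStep]; omega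
        simp [isSafeLoopA, hk0, hk1, chainAll_cons, hu]
        intro h2 h3; exfalso; omega
    | false =>
      by_cases hc : y < p ∧ y ≥ p - 3
      · have hd : dnStep p y = true := by simp [dnStep]; omega
        simp [isSafeLoopA, hk0, hk1, chainAll_cons, hd, ih y (k + 1) (by omega)]
        intros; omega
      · have hd : dnStep p y = false := by simp [dnStep]; omega
        simp [isSafeLoopA, hk0, hk1, chainAll_cons, hd]
        intro h2 h3; exfalso; omega

-- B in chain form
lemma alt_eq_chain (report : List Int) :
    is_safe_alt report = (match report with
      | [] => true
      | x :: rest => (chainAll true x rest || chainAll false x rest)) := by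
  cases report with
  | nil => rfl
  | cons x rest =>
    simp only [is_safe_alt, List.tail_cons, List.all_map, chainAll]
    rfl

-- ===== VERDICT (by name: the statement is the Claim_ definition above) =====
theorem is_safe_spec : Claim_equal_is_safe := by
  intro report _
  unfold Spec_is_safe
  rw [alt_eq_chain]
  cases report with
  | nil => rfl
  | cons x rest =>
    cases rest with
    | nil => rfl
    | cons y l =>
      by_cases hxy : y > x
      · by_cases hc : y ≤ x + 3
        · have hu : upStep x y = true := by simp [upStep]; omega
          have hd : dnStep x y = false := by simp [dnStep]; omega
          simp [is_safe, PySem.List.enumerate_cons, isSafeLoopA, hxy, hc, chainAll_cons,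
            hu, hd, loopA_tail l y true 2 (by omega)]
        · have hu : upStep x y = false := by simp [upStep]; omega
          have hd : dnStep x y = false := by simp [dnStep]; omega
          simp [is_safe, PySem.List.enumerate_cons, isSafeLoopA, hxy, hc, chainAll_cons, hu, hd]
      · by_cases hc : y < x ∧ y ≥ x - 3
        · have hu : upStep x y = false := by simp [upStep]; omega
          have hd : dnStep x y = true := by simp [dnStep]; omega
          simp [is_safe, PySem.List.enumerate_cons, isSafeLoopA, hxy, chainAll_cons,
            hu, hd, loopA_tail l y false 2 (by omega)]
          intros; omega
        · have hu : upStep x y = false := by simp [upStep]; omega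
          have hd : dnStep x y = false := by simp [dnStep]; omega
          simp [is_safe, PySem.List.enumerate_cons, isSafeLoopA, hxy, chainAll_cons, hu, hd]
          intro h2 h3; exfalso; omega
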